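-- pv_equiv track=rewrite | github.com/UTokyoChenYe/SlopeSearch | old/try.py | kmer_matches
-- ===== SOURCE A (Python) =====
-- from collections import Counter
--
-- def count_kmers(sequence: str, k: int) -> Counter:
--     """calculate k-mer frequencies in a given sequence"""
--     kmers = [sequence[i:i+k] for i in range(len(sequence) - k + 1)]
--     return Counter(kmers)
--
-- def kmer_matches(seq1: str, seq2: str, k: int) -> int:
--     """calculate the number of k-mer matches between two sequences"""
--     kmer_count1 = count_kmers(seq1, k)
--     kmer_count2 = count_kmers(seq2, k)
--     matches = 0
--     for kmer in kmer_count1: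
--         if kmer in kmer_count2:
--             matches += kmer_count1[kmer] * kmer_count2[kmer]
--     return matches
-- ===== SOURCE B (Python) =====
-- from collections import Counter
--
-- def kmer_matches(seq1: str, seq2: str, k: int) -> int:
--     """Single frequency index for seq1, then stream over seq2's k-mer positions."""
--     count1 = Counter(seq1[i:i+k] for i in range(len(seq1) - k + 1))
--     total = 0
--     for i in range(len(seq2) - k + 1):
--         total += count1.get(seq2[i:i+k], 0)
--     return total
-- ===== Notes on version B (the rewrite author's own statement) =====
-- stated objective: alternative
-- what changed: B builds a frequency index only for seq1 and streams over every k-mer position of seq2, adding count1.get(kmer, 0) per position, instead of building a second Counter and iterating its unique keys with a membership test.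
import Mathlib
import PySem

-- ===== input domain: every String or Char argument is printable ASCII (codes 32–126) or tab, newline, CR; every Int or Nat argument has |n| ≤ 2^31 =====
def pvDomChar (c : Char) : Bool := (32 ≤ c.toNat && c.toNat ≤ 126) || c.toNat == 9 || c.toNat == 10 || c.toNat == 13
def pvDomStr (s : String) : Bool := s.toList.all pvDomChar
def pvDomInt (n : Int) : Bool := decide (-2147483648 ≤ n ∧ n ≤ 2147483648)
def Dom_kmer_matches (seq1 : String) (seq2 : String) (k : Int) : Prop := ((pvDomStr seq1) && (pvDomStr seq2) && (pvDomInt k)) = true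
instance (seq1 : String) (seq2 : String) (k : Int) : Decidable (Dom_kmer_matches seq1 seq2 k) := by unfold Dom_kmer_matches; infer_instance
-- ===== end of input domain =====

-- B builds the frequency index only for seq1 and streams over seq2's k-mer positions
-- instead of building a second Counter and iterating its unique keys (objective: alternative decomposition).

-- ===== PORT A =====
-- helper: count_kmers(sequence, k) = Counter of all slices sequence[i:i+k]
def count_kmers (sequence : String) (k : Int) : PySem.Dict String Int :=
  PySem.Dict.counter
    ((PySem.List.pyRange 0 (PySem.Str.len sequence - k + 1) 1).map
      (fun i => PySem.Str.slice sequence (some i) (some (i + k))))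

def kmer_matches (seq1 : String) (seq2 : String) (k : Int) : Int :=
  let kmer_count1 := count_kmers seq1 k
  let kmer_count2 := count_kmers seq2 k
  kmer_count1.keys.foldl
    (fun m kmer =>
      if kmer_count2.contains kmer then
        m + kmer_count1.getD kmer 0 * kmer_count2.getD kmer 0
      else m) 0

-- ===== PORT B =====
def kmer_matches_alt (seq1 : String) (seq2 : String) (k : Int) : Int :=
  let count1 := PySem.Dict.counter
    ((PySem.List.pyRange 0 (PySem.Str.len seq1 - k + 1) 1).map
      (fun i => PySem.Str.slice seq1 (some i) (some (i + k))))
  (PySem.List.pyRange 0 (PySem.Str.len seq2 - k + 1) 1).foldl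
    (fun total i => total + count1.getD (PySem.Str.slice seq2 (some i) (some (i + k))) 0) 0

-- ===== PRECONDITION & SPEC =====
def Spec_kmer_matches (seq1 : String) (seq2 : String) (k : Int) (out : Int) : Prop := out = kmer_matches_alt seq1 seq2 k
instance (seq1 : String) (seq2 : String) (k : Int) (out : Int) : Decidable (Spec_kmer_matches seq1 seq2 k out) := by unfold Spec_kmer_matches; infer_instance

-- ===== CLAIM (what is proved, stated in full; the proofs are below) =====
def Claim_equal_kmer_matches : Prop := ∀ (seq1 : String) (seq2 : String) (k : Int), Dom_kmer_matches seq1 seq2 k → Spec_kmer_matches seq1 seq2 k (kmer_matches seq1 seq2 k)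

-- ===== LEMMAS AND PROOFS =====

-- Σ_{u ∈ d} c u · [u = x] = c x if x ∈ d else 0, for d without duplicates
theorem pv_sum_indicator (c : String → Int) (d : List String) (x : String) (hd : d.Nodup) :
    (d.map (fun u => c u * (if u = x then 1 else 0))).sum = if x ∈ d then c x else 0 := by
  induction d with
  | nil => simp
  | cons y t ih =>
    rcases List.nodup_cons.mp hd with ⟨hy, ht⟩
    by_cases hxy : y = x
    · subst hxy
      have hz : (t.map (fun u => if u = y then c u else 0)).sum = 0 := by
        apply List.sum_eq_zero
        intro z hz
        rcases List.mem_map.mp hz with ⟨u, hu, rfl⟩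
        have : ¬ u = y := fun h => hy (h ▸ hu)
        simp [this]
      simp [hz]
    · simp only [List.map_cons, List.sum_cons, if_neg hxy, mul_zero, zero_add, ih ht,
        List.mem_cons]
      have : ¬ x = y := fun h => hxy h.symm
      simp [this]

-- Σ_{u ∈ set(l1)} count_{l1}(u) · count_{l2}(u) = Σ_{x ∈ l2} count_{l1}(x)
theorem pv_counter_sum (l1 l2 : List String) :
    ((PySem.Set.ofList l1).map (fun u => (l1.count u : Int) * (l2.count u : Int))).sum
      = (l2.map (fun x => (l1.count x : Int))).sum := by
  induction l2 with
  | nil => simp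
  | cons x t ih =>
    have hcount : (fun u => ((l1.count u : Int) * ((x :: t).count u : Int)))
        = fun u => (l1.count u : Int) * (t.count u : Int)
          + (l1.count u : Int) * (if u = x then 1 else 0) := by
      funext u
      have h : ((x :: t).count u : Int) = (t.count u : Int) + (if u = x then 1 else 0) := by
        by_cases h : u = x
        · subst h; simp
        · have hx : ¬ x = u := fun hh => h hh.symm
          simp [h, hx]
      rw [h]; ring
    rw [hcount, PySem.List.sum_map_add_int,
      pv_sum_indicator (fun u => (l1.count u : Int)) _ x (PySem.Set.nodup_ofList l1), ih]
    by_cases hx : x ∈ l1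
    · simp [PySem.Set.mem_ofList, hx, add_comm]
    · have : l1.count x = 0 := List.count_eq_zero.mpr hx
      simp [PySem.Set.mem_ofList, hx, this]

-- the two ports, seen as the same double sum over the two k-mer lists
theorem pv_ports_eq (l1 l2 : List String) :
    (PySem.Set.ofList l1).foldl
        (fun m u =>
          if (PySem.Dict.counter l2).contains u then
            m + (PySem.Dict.counter l1).getD u 0 * (PySem.Dict.counter l2).getD u 0
          else m) 0
      = l2.foldl (fun t x => t + (PySem.Dict.counter l1).getD x 0) 0 := by
  have hA : ∀ (acc : Int) (u : String),
      (if (PySem.Dict.counter l2).contains u then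
        acc + (PySem.Dict.counter l1).getD u 0 * (PySem.Dict.counter l2).getD u 0
      else acc)
      = acc + (l1.count u : Int) * (l2.count u : Int) := by
    intro acc u
    by_cases hu : u ∈ l2
    · simp [PySem.Dict.contains_counter, PySem.Dict.getD_counter, hu]
    · have : l2.count u = 0 := List.count_eq_zero.mpr hu
      simp [PySem.Dict.contains_counter, hu, this]
  have h1 : (PySem.Set.ofList l1).foldl
        (fun m u =>
          if (PySem.Dict.counter l2).contains u then
            m + (PySem.Dict.counter l1).getD u 0 * (PySem.Dict.counter l2).getD u 0
          else m) 0
      = (PySem.Set.ofList l1).foldl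
        (fun acc u => acc + (l1.count u : Int) * (l2.count u : Int)) 0 :=
    PySem.List.foldl_congr_mem _ _ _ _ (fun acc u hu => hA acc u)
  have h2 : l2.foldl (fun t x => t + (PySem.Dict.counter l1).getD x 0) 0
      = l2.foldl (fun t x => t + (l1.count x : Int)) 0 :=
    PySem.List.foldl_congr_mem _ _ _ _ (fun acc x hx => by rw [PySem.Dict.getD_counter])
  rw [h1, h2, PySem.List.foldl_add, PySem.List.foldl_add, pv_counter_sum l1 l2]

-- ===== VERDICT (by name: the statement is the Claim_ definition above) =====
theorem kmer_matches_spec : Claim_equal_kmer_matches := by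
  intro seq1 seq2 k _
  show kmer_matches seq1 seq2 k = kmer_matches_alt seq1 seq2 k
  unfold kmer_matches kmer_matches_alt count_kmers
  dsimp only
  rw [PySem.Dict.keys_counter, pv_ports_eq]
  exact List.foldl_map
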